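-- pv_equiv track=rewrite | github.com/RichiiiTV/GreyModel | src/greymodel/training.py | station_balanced_index_order
-- ===== SOURCE A (Python) =====
-- from typing import Dict, Iterable, Mapping, Optional, Sequence, Tuple
--
-- def station_balanced_index_order(station_ids: Iterable[int]):
--     grouped: Dict[int, list] = {}
--     for index, station_id in enumerate(station_ids):
--         grouped.setdefault(int(station_id), []).append(index)
--
--     max_length = max((len(indices) for indices in grouped.values()), default=0)
--     interleaved = []
--     for offset in range(max_length):
--         for station_id in sorted(grouped):
--             indices = grouped[station_id]
--             if offset < len(indices):
--                 interleaved.append(indices[offset])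
--     return interleaved
-- ===== SOURCE B (Python) =====
-- def station_balanced_index_order(station_ids):
--     # Decorate-and-sort: tag each index with (occurrence-rank within its
--     # station, station id), then one stable sort by that tuple key gives
--     # exactly the round-robin order (rank = offset, then station ascending).
--     seen = {}
--     keyed = []
--     for index, station_id in enumerate(station_ids):
--         sid = int(station_id)
--         rank = seen.get(sid, 0)
--         seen[sid] = rank + 1
--         keyed.append((rank, sid, index))
--     keyed.sort(key=lambda t: (t[0], t[1]))
--     return [t[2] for t in keyed]
-- ===== Notes on version B (the rewrite author's own statement) =====
-- stated objective: alternative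
-- what changed: B replaces A's group-then-round-robin (dict of index lists swept once per offset over re-sorted keys) by decorate-and-sort: one pass tags each index with (occurrence rank within its station, station id) and a single sort by that tuple key yields the interleaved order directly.
import Mathlib
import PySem

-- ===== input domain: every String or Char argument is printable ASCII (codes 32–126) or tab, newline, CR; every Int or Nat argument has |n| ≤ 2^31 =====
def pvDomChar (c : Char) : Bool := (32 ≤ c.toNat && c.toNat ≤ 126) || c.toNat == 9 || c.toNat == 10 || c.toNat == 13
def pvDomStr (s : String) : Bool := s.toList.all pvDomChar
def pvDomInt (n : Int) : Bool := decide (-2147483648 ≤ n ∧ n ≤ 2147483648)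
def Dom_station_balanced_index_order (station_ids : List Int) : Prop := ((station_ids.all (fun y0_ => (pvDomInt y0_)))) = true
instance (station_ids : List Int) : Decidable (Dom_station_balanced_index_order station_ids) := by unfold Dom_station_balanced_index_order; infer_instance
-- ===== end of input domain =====

-- B replaces A's group-then-round-robin sweep by decorate-and-sort: tag each index with
-- (occurrence rank within its station, station id) in one pass and sort once by that tuple key.

-- ===== PORT A =====
-- grouped.setdefault(int(station_id), []).append(index) over enumerate(station_ids)
def pvGroup (station_ids : List Int) : PySem.Dict Int (List Int) :=
  (PySem.List.enumerate station_ids).foldl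
    (fun d p => d.modify p.2 [] (fun v => v ++ [p.1])) PySem.Dict.empty

def station_balanced_index_order (station_ids : List Int) : List Int :=
  let grouped := pvGroup station_ids
  -- max((len(indices) for indices in grouped.values()), default=0)
  let max_length : Int :=
    PySem.List.maxD (grouped.values.map (fun v => (v.length : Int))) (fun x => x) 0
  -- for offset in range(max_length): for station_id in sorted(grouped): …
  (PySem.List.pyRange 0 max_length 1).foldl
    (fun interleaved offset =>
      (PySem.List.sorted grouped.keys (fun k => k) false).foldl
        (fun interleaved station_id =>
          -- grouped[station_id] never raises (station_id ∈ grouped), so getD is exact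
          if offset < ((grouped.getD station_id []).length : Int) then
            interleaved ++ [PySem.List.pyGetD (grouped.getD station_id []) offset 0]
          else interleaved)
        interleaved)
    []

-- ===== PORT B =====
-- one pass: rank = seen.get(sid, 0); seen[sid] = rank + 1; keyed.append((rank, sid, index));
-- then keyed.sort(key=lambda t: (t[0], t[1])) — the lexicographic tuple key is Lex (Int × Int) —
-- and the projection [t[2] for t in keyed].
def station_balanced_index_order_alt (station_ids : List Int) : List Int :=
  let keyed :=
    ((PySem.List.enumerate station_ids).foldl
      (fun s p =>
        let rank := s.1.getD p.2 0
        (s.1.insert p.2 (rank + 1), s.2 ++ [(rank, p.2, p.1)]))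
      (PySem.Dict.empty, ([] : List (Int × Int × Int)))).2
  (PySem.List.sorted keyed (fun t => toLex (t.1, t.2.1)) false).map (fun t => t.2.2)

-- ===== PRECONDITION & SPEC =====
def Spec_station_balanced_index_order (station_ids : List Int) (out : List Int) : Prop := out = station_balanced_index_order_alt station_ids
instance (station_ids : List Int) (out : List Int) : Decidable (Spec_station_balanced_index_order station_ids out) := by unfold Spec_station_balanced_index_order; infer_instance

-- ===== CLAIM (what is proved, stated in full; the proofs are below) =====
def Claim_equal_station_balanced_index_order : Prop := ∀ (station_ids : List Int), Dom_station_balanced_index_order station_ids → Spec_station_balanced_index_order station_ids (station_balanced_index_order station_ids)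

-- ===== LEMMAS AND PROOFS =====

-- ---- A-side dict facts ----

-- grouped.getD k [] is the list of indices of station k, via the swap trick
theorem pvGroup_getD (station_ids : List Int) (k : Int) :
    (pvGroup station_ids).getD k [] =
      ((PySem.List.enumerate station_ids).filter (fun p => p.2 == k)).map (fun p => p.1) := by
  have hfold : pvGroup station_ids =
      ((PySem.List.enumerate station_ids).map Prod.swap).foldl
        (fun d p => d.modify p.1 [] (fun v => v ++ [p.2])) PySem.Dict.empty := by
    rw [List.foldl_map]
    rfl
  rw [hfold, PySem.Dict.getD_foldl_modify_append]
  rw [PySem.Dict.getD_empty, List.nil_append, List.filter_map, List.map_map]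
  rfl

theorem pvGroup_keys (station_ids : List Int) :
    (pvGroup station_ids).keys = PySem.Set.ofList station_ids := by
  unfold pvGroup
  have h := PySem.Dict.keys_foldl_modify_key (PySem.List.enumerate station_ids)
    (fun p : Int × Int => p.2) ([] : List Int)
    (fun (_ : PySem.Dict Int (List Int)) (p : Int × Int) (v : List Int) => v ++ [p.1])
    PySem.Dict.empty
  simp only [PySem.Dict.keys_empty, PySem.List.map_snd_enumerate] at h
  rw [h]
  exact PySem.Set.update_nil_left station_ids

theorem pvGroup_nodup_keys (station_ids : List Int) : (pvGroup station_ids).keys.Nodup := by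
  unfold pvGroup
  exact PySem.Dict.nodup_keys_foldl_modify_key (PySem.List.enumerate station_ids)
    (fun p : Int × Int => p.2) ([] : List Int)
    (fun (_ : PySem.Dict Int (List Int)) (p : Int × Int) (v : List Int) => v ++ [p.1])
    PySem.Dict.empty PySem.Dict.nodup_keys_empty

-- the A-side max is an upper bound on every group length, and nonnegative
theorem pv_max_bound (station_ids : List Int) (k : Int)
    (hk : k ∈ (pvGroup station_ids).keys) :
    (((pvGroup station_ids).getD k []).length : Int) ≤
      PySem.List.maxD ((pvGroup station_ids).values.map (fun v => (v.length : Int))) (fun x => x) 0 := by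
  have hv : (pvGroup station_ids).getD k [] ∈ (pvGroup station_ids).values := by
    rw [PySem.Dict.values_eq_map_keys _ (pvGroup_nodup_keys station_ids) []]
    exact List.mem_map_of_mem hk
  have hmem : (((pvGroup station_ids).getD k []).length : Int) ∈
      (pvGroup station_ids).values.map (fun v => (v.length : Int)) :=
    List.mem_map_of_mem hv
  unfold PySem.List.maxD
  cases hmax : PySem.List.max? ((pvGroup station_ids).values.map (fun v => (v.length : Int)))
      (fun x => x) with
  | none =>
    rw [PySem.List.max?_eq_none_iff] at hmax
    rw [hmax] at hmem
    simp at hmem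
  | some m =>
    exact PySem.List.max?_isMax hmax _ hmem

theorem pv_max_nonneg (station_ids : List Int) :
    0 ≤ PySem.List.maxD ((pvGroup station_ids).values.map (fun v => (v.length : Int))) (fun x => x) 0 := by
  unfold PySem.List.maxD
  cases hmax : PySem.List.max? ((pvGroup station_ids).values.map (fun v => (v.length : Int)))
      (fun x => x) with
  | none => simp
  | some m =>
    have := PySem.List.max?_mem hmax
    obtain ⟨v, _, rfl⟩ := List.mem_map.mp this
    simp

-- ---- occurrence lists ----

-- the index list A builds for station k
def pvOcc (ids : List Int) (k : Int) : List Int :=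
  ((PySem.List.enumerate ids).filter (fun p => p.2 == k)).map (fun p => p.1)

theorem pvOcc_append_singleton (ids : List Int) (x k : Int) :
    pvOcc (ids ++ [x]) k =
      pvOcc ids k ++ (if x == k then [(ids.length : Int)] else []) := by
  unfold pvOcc
  rw [PySem.List.enumerate_append, List.filter_append, List.map_append]
  congr 1
  simp [PySem.List.enumerate_cons]
  split_ifs with h <;> simp [h]

theorem pvOcc_length (ids : List Int) (k : Int) :
    (pvOcc ids k).length = ids.count k := by
  induction ids using List.reverseRecOn with
  | nil => rfl
  | append_singleton ids x ih =>
    rw [pvOcc_append_singleton, List.length_append, ih, List.count_append]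
    by_cases h : x == k <;> simp [h, List.count_singleton]

-- the (take i).count-th occurrence of ids[i] is index i …
theorem pvOcc_getD (ids : List Int) : ∀ i : Nat, i < ids.length →
    (ids.take i).count (ids.getD i 0) < (pvOcc ids (ids.getD i 0)).length ∧
      (pvOcc ids (ids.getD i 0)).getD ((ids.take i).count (ids.getD i 0)) 0 = (i : Int) := by
  induction ids using List.reverseRecOn with
  | nil => intro i hi; simp at hi
  | append_singleton ids x ih =>
    intro i hi
    rw [pvOcc_append_singleton]
    by_cases hcase : i < ids.length
    · have hget : (ids ++ [x]).getD i 0 = ids.getD i 0 := List.getD_append _ _ _ _ hcase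
      have htake : (ids ++ [x]).take i = ids.take i :=
        List.take_append_of_le_length (le_of_lt hcase)
      rw [hget, htake]
      obtain ⟨h1, h2⟩ := ih i hcase
      refine ⟨by rw [List.length_append]; omega, ?_⟩
      rw [List.getD_append _ _ _ _ h1, h2]
    · have hi' : i = ids.length := by
        rw [List.length_append, List.length_singleton] at hi; omega
      subst hi'
      have hget : (ids ++ [x]).getD ids.length 0 = x := by
        rw [List.getD_eq_getElem?_getD]; simp
      have htake : (ids ++ [x]).take ids.length = ids := by simp
      rw [hget, htake]
      simp only [beq_self_eq_true, if_true]
      have hlen : (pvOcc ids x).length = ids.count x := pvOcc_length ids x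
      refine ⟨by rw [List.length_append]; simp [hlen], ?_⟩
      rw [List.getD_append_right _ _ _ _ (by omega), hlen]
      simp

-- … and every occurrence-list entry is such an index
theorem pvOcc_elim (ids : List Int) (k : Int) : ∀ o : Nat, o < (pvOcc ids k).length →
    ∃ i : Nat, i < ids.length ∧ (pvOcc ids k).getD o 0 = (i : Int) ∧
      ids.getD i 0 = k ∧ (ids.take i).count k = o := by
  induction ids using List.reverseRecOn with
  | nil => intro o ho; simp [pvOcc] at ho
  | append_singleton ids x ih =>
    intro o ho
    rw [pvOcc_append_singleton] at ho ⊢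
    by_cases hcase : o < (pvOcc ids k).length
    · obtain ⟨i, hi, hg, hk, hc⟩ := ih o hcase
      refine ⟨i, by rw [List.length_append]; omega, ?_, ?_, ?_⟩
      · rw [List.getD_append _ _ _ _ hcase, hg]
      · rw [List.getD_append _ _ _ _ hi, hk]
      · rw [List.take_append_of_le_length (le_of_lt hi), hc]
    · have hx : x == k := by
        by_contra hxk
        rw [if_neg (by simpa using hxk)] at ho
        simp at ho; omega
      rw [if_pos hx] at ho ⊢
      have hxk : x = k := by simpa using hx
      have ho' : o = (pvOcc ids k).length := by
        rw [List.length_append, List.length_singleton] at ho; omega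
      refine ⟨ids.length, by simp, ?_, ?_, ?_⟩
      · rw [ho', List.getD_append_right _ _ _ _ (le_refl _)]
        simp
      · rw [List.getD_eq_getElem?_getD]; simp [hxk]
      · rw [List.take_append_of_le_length (le_refl _), List.take_length, ho',
          pvOcc_length]

-- ---- B-side fold characterisation ----

def pvDec (d : PySem.Dict Int Int) : List (Int × Int) → List (Int × Int × Int)
  | [] => []
  | p :: t => (d.getD p.2 0, p.2, p.1) :: pvDec (d.insert p.2 (d.getD p.2 0 + 1)) t

theorem pvFold_split (ps : List (Int × Int)) (d : PySem.Dict Int Int)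
    (acc : List (Int × Int × Int)) :
    ps.foldl (fun s p =>
        let rank := s.1.getD p.2 0
        (s.1.insert p.2 (rank + 1), s.2 ++ [(rank, p.2, p.1)])) (d, acc)
      = (ps.foldl (fun d p => d.insert p.2 (d.getD p.2 0 + 1)) d, acc ++ pvDec d ps) := by
  induction ps generalizing d acc with
  | nil => simp [pvDec]
  | cons p t ih => simp [pvDec, ih]

theorem pvDec_append (l l' : List (Int × Int)) (d : PySem.Dict Int Int) :
    pvDec d (l ++ l') = pvDec d l ++ pvDec (l.foldl (fun d p => d.insert p.2 (d.getD p.2 0 + 1)) d) l' := by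
  induction l generalizing d with
  | nil => simp [pvDec]
  | cons p t ih => simp [pvDec, ih]

-- the decorated list B builds, stated positionally
def pvKeyed (ids : List Int) : List (Int × Int × Int) :=
  (List.range ids.length).map
    (fun i => (((ids.take i).count (ids.getD i 0) : Int), ids.getD i 0, (i : Int)))

theorem pvKeyed_eq (ids : List Int) :
    pvDec PySem.Dict.empty (PySem.List.enumerate ids) = pvKeyed ids := by
  induction ids using List.reverseRecOn with
  | nil => rfl
  | append_singleton ids x ih =>
    have henum : PySem.List.enumerate (ids ++ [x])
        = PySem.List.enumerate ids ++ [((ids.length : Int), x)] := by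
      rw [PySem.List.enumerate_append]
      simp [PySem.List.enumerate_cons]
    rw [henum, pvDec_append, ih]
    have hdict : (PySem.List.enumerate ids).foldl
        (fun d p => d.insert p.2 (d.getD p.2 (0:Int) + 1)) PySem.Dict.empty
        = ids.foldl (fun d y => d.insert y (d.getD y (0:Int) + 1)) PySem.Dict.empty := by
      conv_rhs => rw [← PySem.List.map_snd_enumerate ids 0]
      rw [List.foldl_map]
    have hgd : ((PySem.List.enumerate ids).foldl
        (fun d p => d.insert p.2 (d.getD p.2 0 + 1)) PySem.Dict.empty).getD x 0
        = (ids.count x : Int) := by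
      simp only [hdict]
      rw [PySem.Dict.getD_foldl_insert_add_one]
      simp
    have hdec : pvDec ((PySem.List.enumerate ids).foldl
        (fun d p => d.insert p.2 (d.getD p.2 0 + 1)) PySem.Dict.empty)
        [((ids.length : Int), x)]
        = [((ids.count x : Int), x, (ids.length : Int))] := by
      simp [pvDec, hgd]
    rw [hdec]
    unfold pvKeyed
    rw [List.length_append, List.length_singleton, List.range_succ, List.map_append]
    congr 1
    · apply List.map_congr_left
      intro i hi
      rw [List.mem_range] at hi
      rw [List.getD_append _ _ _ _ hi, List.take_append_of_le_length (le_of_lt hi)]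
    · have hget : (ids ++ [x]).getD ids.length 0 = x := by
        rw [List.getD_eq_getElem?_getD]; simp
      simp [List.take_append_of_le_length (le_refl _)]

theorem pvKeyed_nodup (ids : List Int) : (pvKeyed ids).Nodup := by
  unfold pvKeyed
  refine List.Nodup.map ?_ List.nodup_range
  intro i j h
  have := congrArg (fun t => t.2.2) h
  simpa using this

-- ---- the decorated A-output ----

def pvAdec (ids : List Int) : List (Int × Int × Int) :=
  (List.range (PySem.List.maxD ((pvGroup ids).values.map (fun v => (v.length : Int))) (fun x => x) 0).toNat).flatMap
    (fun o =>
      ((PySem.List.sorted (pvGroup ids).keys (fun k => k) false).filter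
          (fun k => decide (o < ((pvGroup ids).getD k []).length))).map
        (fun k => ((o : Int), k, ((pvGroup ids).getD k []).getD o 0)))

theorem pvAdec_pairwise (ids : List Int) :
    (pvAdec ids).Pairwise (fun a b => toLex (a.1, a.2.1) < toLex (b.1, b.2.1)) := by
  unfold pvAdec
  rw [List.pairwise_flatMap]
  constructor
  · intro o _
    rw [List.pairwise_map]
    refine List.Pairwise.imp ?_
      ((by rw [pvGroup_keys]; exact PySem.List.sorted_ofList_pairwise_lt ids :
        (PySem.List.sorted (pvGroup ids).keys (fun k => k) false).Pairwise (· < ·)).filter _)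
    intro k k' hkk'
    rw [Prod.Lex.lt_iff]
    exact Or.inr ⟨rfl, hkk'⟩
  · refine List.Pairwise.imp ?_ List.pairwise_lt_range
    intro o o' hoo' x hx y hy
    obtain ⟨k, _, rfl⟩ := List.mem_map.mp hx
    obtain ⟨k', _, rfl⟩ := List.mem_map.mp hy
    rw [Prod.Lex.lt_iff]
    exact Or.inl (by simp only [ofLex_toLex]; exact_mod_cast hoo')

theorem pvAdec_mem (ids : List Int) (t : Int × Int × Int) :
    t ∈ pvAdec ids ↔ t ∈ pvKeyed ids := by
  unfold pvAdec pvKeyed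
  rw [List.mem_flatMap]
  constructor
  · rintro ⟨o, ho, ht⟩
    obtain ⟨k, hk, rfl⟩ := List.mem_map.mp ht
    rw [List.mem_filter, decide_eq_true_eq] at hk
    obtain ⟨hks, holt⟩ := hk
    have hgd : (pvGroup ids).getD k [] = pvOcc ids k := pvGroup_getD ids k
    rw [hgd] at holt ⊢
    obtain ⟨i, hi, hgv, hik, hcnt⟩ := pvOcc_elim ids k o holt
    rw [List.mem_map]
    exact ⟨i, List.mem_range.mpr hi, by rw [hik, hcnt, hgv]⟩
  · intro ht
    obtain ⟨i, hir, rfl⟩ := List.mem_map.mp ht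
    have hi : i < ids.length := List.mem_range.mp hir
    obtain ⟨hlt, hgv⟩ := pvOcc_getD ids i hi
    have hkmem : ids.getD i 0 ∈ (pvGroup ids).keys := by
      rw [pvGroup_keys, PySem.Set.mem_ofList, List.getD_eq_getElem ids 0 hi]
      exact List.getElem_mem hi
    have hbound := pv_max_bound ids (ids.getD i 0) hkmem
    have hgd : (pvGroup ids).getD (ids.getD i 0) [] = pvOcc ids (ids.getD i 0) :=
      pvGroup_getD ids (ids.getD i 0)
    rw [hgd] at hbound
    refine ⟨(ids.take i).count (ids.getD i 0), ?_, ?_⟩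
    · rw [List.mem_range]
      omega
    · rw [List.mem_map]
      refine ⟨ids.getD i 0, ?_, ?_⟩
      · rw [List.mem_filter, PySem.List.mem_sorted, hgd]
        exact ⟨hkmem, decide_eq_true hlt⟩
      · rw [hgd, hgv]

theorem pvAdec_nodup (ids : List Int) : (pvAdec ids).Nodup :=
  (pvAdec_pairwise ids).imp (fun {a b} h => by
    intro hab; rw [hab] at h; exact lt_irrefl _ h)

theorem pv_sorted_keyed (ids : List Int) :
    PySem.List.sorted (pvKeyed ids) (fun t => toLex (t.1, t.2.1)) false = pvAdec ids := by
  refine PySem.List.sorted_eq_of_perm_of_pairwise_lt _ _ _ ?_ (pvAdec_pairwise ids)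
  exact (List.perm_ext_iff_of_nodup (pvAdec_nodup ids) (pvKeyed_nodup ids)).mpr
    (fun t => pvAdec_mem ids t)

-- ===== VERDICT (by name: the statement is the Claim_ definition above) =====
theorem station_balanced_index_order_spec : Claim_equal_station_balanced_index_order := by
  intro ids _
  unfold Spec_station_balanced_index_order
  unfold station_balanced_index_order station_balanced_index_order_alt
  simp only []
  set grouped := pvGroup ids with hg
  set M : Int := PySem.List.maxD (grouped.values.map (fun v => (v.length : Int))) (fun x => x) 0 with hM
  set ks := PySem.List.sorted grouped.keys (fun k => k) false with hks
  -- B side: the fold builds pvKeyed, and its sort is pvAdec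
  have hB : ((PySem.List.enumerate ids).foldl
      (fun s p =>
        let rank := s.1.getD p.2 0
        (s.1.insert p.2 (rank + 1), s.2 ++ [(rank, p.2, p.1)]))
      (PySem.Dict.empty, ([] : List (Int × Int × Int)))).2 = pvKeyed ids := by
    rw [pvFold_split, List.nil_append, pvKeyed_eq]
  rw [hB, pv_sorted_keyed]
  -- A side: inner loop appends one row
  have hinner : ∀ (acc : List Int) (offset : Int),
      ks.foldl (fun interleaved station_id =>
        if offset < ((grouped.getD station_id []).length : Int) then
          interleaved ++ [PySem.List.pyGetD (grouped.getD station_id []) offset 0]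
        else interleaved) acc
      = acc ++ (ks.filter (fun k => decide (offset < ((grouped.getD k []).length : Int)))).map
          (fun k => PySem.List.pyGetD (grouped.getD k []) offset 0) := by
    intro acc offset
    exact PySem.List.foldl_append_ite (fun k => offset < ((grouped.getD k []).length : Int))
      (fun k => PySem.List.pyGetD (grouped.getD k []) offset 0) ks acc
  -- outer loop is a flatMap of rows
  have houter :
      (PySem.List.pyRange 0 M 1).foldl (fun interleaved offset =>
        ks.foldl (fun interleaved station_id =>
          if offset < ((grouped.getD station_id []).length : Int) then
            interleaved ++ [PySem.List.pyGetD (grouped.getD station_id []) offset 0]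
          else interleaved) interleaved) []
      = (PySem.List.pyRange 0 M 1).flatMap (fun offset =>
          (ks.filter (fun k => decide (offset < ((grouped.getD k []).length : Int)))).map
            (fun k => PySem.List.pyGetD (grouped.getD k []) offset 0)) := by
    have hfun : (fun (interleaved : List Int) (offset : Int) =>
        ks.foldl (fun interleaved station_id =>
          if offset < ((grouped.getD station_id []).length : Int) then
            interleaved ++ [PySem.List.pyGetD (grouped.getD station_id []) offset 0]
          else interleaved) interleaved)
        = (fun (acc : List Int) (offset : Int) =>
            acc ++ (ks.filter (fun k => decide (offset < ((grouped.getD k []).length : Int)))).map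
              (fun k => PySem.List.pyGetD (grouped.getD k []) offset 0)) := by
      funext acc offset; exact hinner acc offset
    rw [hfun, PySem.List.foldl_append_eq_flatMap, List.nil_append]
  rw [houter]
  -- switch the offset range to Nat and identify each row with a decorated row
  have hMnn : 0 ≤ M := pv_max_nonneg ids
  have hMcast : M = ((M.toNat : Nat) : Int) := (Int.toNat_of_nonneg hMnn).symm
  rw [hMcast, PySem.List.pyRange_zero_natCast, List.flatMap_map]
  unfold pvAdec
  rw [List.map_flatMap]
  apply List.flatMap_congr
  intro o _
  rw [List.map_map]
  have hfilter : (ks.filter (fun k => decide ((o : Int) < ((grouped.getD k []).length : Int))))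
      = ks.filter (fun k => decide (o < (grouped.getD k []).length)) := by
    apply List.filter_congr; intro k _; simp
  rw [hfilter]
  apply List.map_congr_left
  intro k _
  exact PySem.List.pyGetD_natCast _ o 0
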